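-- pv_equiv track=rewrite | github.com/Adilet33709/Automatic-generation-of-graded-vocabulary-lists | Codes/Evaluation/functions_ICNALE.py | get_allgram_MWE
-- ===== SOURCE A (Python) =====
-- def get_allgram_MWE(list_of_dicts, gold, gram):
--     output_list = list_of_dicts
--     Gold = gold.copy()
--     ## Turn stings into list
--     for p in range(len(Gold)):
--         Gold[p] = Gold[p].split(" ")
--     ## For each possible ngram check
--     for i in range(len(list_of_dicts)-(gram-1)):
--         MWE = []
--         for r in range(gram):
--             MWE.append(list_of_dicts[i+r]["lemma"])
--         MWE_words = []
--         for w in range(gram):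
--             MWE_words.append(list_of_dicts[i+w]["word"])
--         for gold in Gold:
--             ## check if gold and MWE are the same elementwise except for wildcard
--             if len(gold) == len(MWE):
--                 count = 0
--                 for j in range(len(gold)):
--                     if gold[j] == "wildcard":
--                         count += 1
--                     elif gold[j] == MWE[j]:
--                         count += 1
--                 count_words = 0
--                 for m in range(len(gold)):
--                     if gold[m] == "wildcard":
--                         count_words += 1
--                     elif gold[m] == MWE_words[m]:
--                         count_words += 1
--                 if count == len(gold):
--                     MWEs = []
--                     for n in range(gram):
--                         MWEs.append(list_of_dicts[i+n]["MWE"])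
--                     ## Check if all elements of MWE isn't MWE already
--                     if all([v == None for v in MWEs]) == True:
--                         for q in range(gram):
--                             MWE_string = MWE[0]
--                             for j in range(len(MWE)-1):
--                                 MWE_string += (" " + MWE[j+1])
--                             output_list[i+q]["MWE"] = MWE_string
--                         break
--                 elif count_words == len(gold):
--                     MWEs = []
--                     for n in range(gram):
--                         MWEs.append(list_of_dicts[i+n]["MWE"])
--                     ## Check if all elements of MWE isn't MWE already
--                     if all([b == None for b in MWEs]) == True:
--                         for c in range(gram):
--                             MWE_string = MWE[0]
--                             for j in range(len(MWE)-1):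
--                                 MWE_string += (" " + MWE[j+1])
--                             output_list[i+c]["MWE"] = MWE_string
--                         break
--     return output_list
-- ===== SOURCE B (Python) =====
-- def get_allgram_MWE(list_of_dicts, gold, gram):
--     # Mutates list_of_dicts in place (as A does) and returns it.
--     n = len(list_of_dicts)
--     if gram < 1 or n < gram:
--         return list_of_dicts
--     pats = [p for p in (g.split(" ") for g in gold) if len(p) == gram]
--     exact = {tuple(p) for p in pats if "wildcard" not in p}
--     wild = [p for p in pats if "wildcard" in p]
--     lemmas = [d["lemma"] for d in list_of_dicts]
--     words = [d["word"] for d in list_of_dicts]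
--
--     def hit(seq, i):
--         if tuple(seq[i:i + gram]) in exact:
--             return True
--         return any(all(p[j] == "wildcard" or p[j] == seq[i + j] for j in range(gram))
--                    for p in wild)
--
--     for i in range(n - gram + 1):
--         if (hit(lemmas, i) or hit(words, i)) and \
--            all(d["MWE"] is None for d in list_of_dicts[i:i + gram]):
--             tag = " ".join(lemmas[i:i + gram])
--             for d in list_of_dicts[i:i + gram]:
--                 d["MWE"] = tag
--     return list_of_dicts
-- ===== Notes on version B (the rewrite author's own statement) =====
-- stated objective: faster
-- what changed: B pre-splits and length-filters the gold patterns once, indexes the wildcard-free ones in a set keyed by the whole token window (the wildcard ones stay a short scan list), precomputes the lemma/word columns, and tags a window after a set lookup plus a short-circuiting wildcard scan, instead of A's per-window rebuild of both token lists and two full counting passes over every gold pattern.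
import Mathlib
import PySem

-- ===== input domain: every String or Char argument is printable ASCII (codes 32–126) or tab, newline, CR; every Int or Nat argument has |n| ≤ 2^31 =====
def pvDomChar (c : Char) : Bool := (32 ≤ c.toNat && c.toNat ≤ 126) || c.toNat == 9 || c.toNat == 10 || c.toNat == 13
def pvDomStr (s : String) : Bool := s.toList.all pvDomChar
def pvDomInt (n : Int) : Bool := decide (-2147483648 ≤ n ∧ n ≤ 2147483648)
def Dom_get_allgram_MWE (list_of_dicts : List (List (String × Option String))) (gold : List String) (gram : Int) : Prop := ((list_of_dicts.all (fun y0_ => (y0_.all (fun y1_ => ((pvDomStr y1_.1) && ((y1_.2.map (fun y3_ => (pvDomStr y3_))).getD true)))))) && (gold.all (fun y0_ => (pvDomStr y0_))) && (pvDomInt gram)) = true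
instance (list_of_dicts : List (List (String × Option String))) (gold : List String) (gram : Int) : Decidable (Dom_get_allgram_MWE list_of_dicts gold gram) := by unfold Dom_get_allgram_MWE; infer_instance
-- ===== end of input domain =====

-- B replaces A's per-window scan over all gold patterns (two full counting passes per pattern) by a
-- precomputed length-filtered pattern index: a set for wildcard-free patterns plus a short wildcard list,
-- applied to precomputed lemma/word columns (objective: faster).  Like A, B mutates list_of_dicts in
-- place (it writes the "MWE" fields); the theorem below is about the returned value.

-- ===== PORT A =====

-- d[k] lookup (Python raises KeyError when k is absent; those inputs are excluded by Pre_)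
def pvKey (d : List (String × Option String)) (k : String) : Option String :=
  (PySem.Dict.get? (PySem.Dict.mk d) k).getD none

-- Python 'x + y' on Optional[str]: a None operand raises TypeError (excluded by Pre_)
def pyConcat : Option String → Option String → Option String
  | some a, some b => some (a ++ b)
  | _, _ => none

-- A's MWE_string accumulation loop (MWE_string = MWE[0]; for j in range(len(MWE)-1): MWE_string += " " + MWE[j+1])
def mweStringA (MWE : List (Option String)) : Option String :=
  (PySem.List.pyRange 0 ((MWE.length : Int) - 1) 1).foldl
    (fun s j => pyConcat s (pyConcat (some " ") (PySem.List.pyGetD MWE (j + 1) none)))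
    (PySem.List.pyGetD MWE 0 none)

-- A's counting loop (count / count_words)
def countA (g : List String) (seq : List (Option String)) : Int :=
  (PySem.List.pyRange 0 (g.length : Int) 1).foldl
    (fun c j =>
      if PySem.List.pyGetD g j "" == "wildcard" then c + 1
      else if (some (PySem.List.pyGetD g j "") : Option String) == PySem.List.pyGetD seq j none then c + 1
      else c) 0

-- A's tagging loop (for q in range(gram): rebuild MWE_string; output_list[i+q]["MWE"] = MWE_string)
def tagLoopA (st : List (List (String × Option String))) (i gram : Int) (MWE : List (Option String)) :
    List (List (String × Option String)) :=
  (PySem.List.pyRange 0 gram 1).foldl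
    (fun s q =>
      let tag := mweStringA MWE
      PySem.List.pySetD s (i + q)
        (((PySem.Dict.mk (PySem.List.pyGetD s (i + q) [])).insert "MWE" tag).items)) st

-- A's inner 'for gold in Gold' loop with its break
def goldLoopA (i gram : Int) (MWE MWE_words : List (Option String))
    (st : List (List (String × Option String))) :
    List (List String) → List (List (String × Option String))
  | [] => st
  | g :: rest =>
    if (g.length : Int) == (MWE.length : Int) then
      let count := countA g MWE
      let count_words := countA g MWE_words
      if count == (g.length : Int) then
        let MWEs := (PySem.List.pyRange 0 gram 1).map
          (fun n => pvKey (PySem.List.pyGetD st (i + n) []) "MWE")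
        if MWEs.all (fun v => v == none) then tagLoopA st i gram MWE
        else goldLoopA i gram MWE MWE_words st rest
      else if count_words == (g.length : Int) then
        let MWEs := (PySem.List.pyRange 0 gram 1).map
          (fun n => pvKey (PySem.List.pyGetD st (i + n) []) "MWE")
        if MWEs.all (fun v => v == none) then tagLoopA st i gram MWE
        else goldLoopA i gram MWE MWE_words st rest
      else goldLoopA i gram MWE MWE_words st rest
    else goldLoopA i gram MWE MWE_words st rest

def get_allgram_MWE (list_of_dicts : List (List (String × Option String))) (gold : List String) (gram : Int) : List (List (String × Option String)) :=
  -- Gold[p] = gold[p].split(" ")  (sep " " is nonempty, so split? is always some)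
  let Gold := gold.map (fun g => (PySem.Str.split? g " ").getD [])
  (PySem.List.pyRange 0 ((list_of_dicts.length : Int) - (gram - 1)) 1).foldl
    (fun st i =>
      let MWE := (PySem.List.pyRange 0 gram 1).map
        (fun r => pvKey (PySem.List.pyGetD st (i + r) []) "lemma")
      let MWE_words := (PySem.List.pyRange 0 gram 1).map
        (fun w => pvKey (PySem.List.pyGetD st (i + w) []) "word")
      goldLoopA i gram MWE MWE_words st Gold)
    list_of_dicts

-- ===== PORT B =====

-- " ".join(xs) on Optional[str] items: a None item raises TypeError (excluded by Pre_)
def pyJoinOpt (xs : List (Option String)) : Option String :=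
  if xs.all (fun o => o.isSome) then some (PySem.Str.join " " (xs.map (fun o => o.getD ""))) else none

-- Source B's hit(seq, i): set lookup for wildcard-free patterns, scan of the wildcard ones
def bHit (gram : Int) (exact : PySem.Set (List (Option String))) (wild : List (List String))
    (seq : List (Option String)) (i : Int) : Bool :=
  exact.contains (PySem.List.slice seq (some i) (some (i + gram)))
  || wild.any (fun p =>
      (PySem.List.pyRange 0 gram 1).all (fun j =>
        PySem.List.pyGetD p j "" == "wildcard"
        || (some (PySem.List.pyGetD p j "") : Option String) == PySem.List.pyGetD seq (i + j) none))

def get_allgram_MWE_alt (list_of_dicts : List (List (String × Option String))) (gold : List String) (gram : Int) : List (List (String × Option String)) :=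
  let n : Int := list_of_dicts.length
  if gram < 1 || n < gram then list_of_dicts
  else
    let pats := (gold.map (fun g => (PySem.Str.split? g " ").getD [])).filter
      (fun p => (p.length : Int) == gram)
    -- Python's set of tuples; a tuple of str equals a tuple of Optional[str] elementwise, hence the 'map some'
    let exact : PySem.Set (List (Option String)) :=
      PySem.Set.ofList ((pats.filter (fun p => !(p.contains "wildcard"))).map (fun p => p.map some))
    let wild := pats.filter (fun p => p.contains "wildcard")
    let lemmas := list_of_dicts.map (fun d => pvKey d "lemma")
    let words := list_of_dicts.map (fun d => pvKey d "word")
    (PySem.List.pyRange 0 (n - gram + 1) 1).foldl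
      (fun st i =>
        if (bHit gram exact wild lemmas i || bHit gram exact wild words i)
            && (PySem.List.slice st (some i) (some (i + gram))).all
                (fun d => pvKey d "MWE" == none) then
          let tag := pyJoinOpt (PySem.List.slice lemmas (some i) (some (i + gram)))
          -- for d in list_of_dicts[i:i+gram]: d["MWE"] = tag  (the slice aliases the list's dicts)
          (PySem.List.pyRange 0 gram 1).foldl
            (fun s q => PySem.List.pySetD s (i + q)
              (((PySem.Dict.mk (PySem.List.pyGetD s (i + q) [])).insert "MWE" tag).items)) st
        else st)
      list_of_dicts

-- ===== PRECONDITION & SPEC =====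
-- Pre_ excludes inputs on which A raises (a window dict missing one of the keys "lemma"/"word"/"MWE"
-- gives KeyError; a None "lemma" value in a tagged window gives TypeError when the tag string is built,
-- except that for gram = 1 A silently stores the None — an artefact — where B's " ".join raises too),
-- so whenever windows are scanned at all (1 ≤ gram ≤ len) every dict must carry the three keys with a
-- non-None "lemma".  (The Lean ports model those raises by total defaults in the same way on both
-- sides, so the proved equality happens to hold even without this hypothesis; Pre_ delimits the inputs
-- on which the ports compute what the Pythons compute.)
def Pre_get_allgram_MWE (list_of_dicts : List (List (String × Option String))) (gold : List String) (gram : Int) : Prop :=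
  (1 ≤ gram ∧ gram ≤ (list_of_dicts.length : Int)) →
    ∀ d ∈ list_of_dicts,
      pvKey d "lemma" ≠ none ∧
      (PySem.Dict.get? (PySem.Dict.mk d) "word").isSome = true ∧
      (PySem.Dict.get? (PySem.Dict.mk d) "MWE").isSome = true
instance (list_of_dicts : List (List (String × Option String))) (gold : List String) (gram : Int) : Decidable (Pre_get_allgram_MWE list_of_dicts gold gram) := by unfold Pre_get_allgram_MWE; infer_instance

def pvWitness_get_allgram_MWE : (List (List (String × Option String))) × List String × Int :=
  ([[("lemma", some "a"), ("word", some "b"), ("MWE", none)],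
    [("lemma", some "c"), ("word", some "d"), ("MWE", none)]], ["a wildcard", "x"], 2)

def Spec_get_allgram_MWE (list_of_dicts : List (List (String × Option String))) (gold : List String) (gram : Int) (out : List (List (String × Option String))) : Prop := out = get_allgram_MWE_alt list_of_dicts gold gram
instance (list_of_dicts : List (List (String × Option String))) (gold : List String) (gram : Int) (out : List (List (String × Option String))) : Decidable (Spec_get_allgram_MWE list_of_dicts gold gram out) := by unfold Spec_get_allgram_MWE; infer_instance

-- ===== CLAIM (what is proved, stated in full; the proofs are below) =====
def Claim_equal_get_allgram_MWE : Prop := ∀ (list_of_dicts : List (List (String × Option String))) (gold : List String) (gram : Int), Dom_get_allgram_MWE list_of_dicts gold gram → Pre_get_allgram_MWE list_of_dicts gold gram → Spec_get_allgram_MWE list_of_dicts gold gram (get_allgram_MWE list_of_dicts gold gram)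

-- ===== LEMMAS AND PROOFS =====

-- generic counting fold: two nested conditional +1's are a countP
theorem foldl_two_if_count {α : Type} (l : List α) (p q : α → Bool) (c : Int) :
    l.foldl (fun c x => if p x then c + 1 else if q x then c + 1 else c) c
      = c + l.countP (fun x => p x || q x) := by
  induction l generalizing c with
  | nil => simp
  | cons x t ih =>
    simp only [List.foldl_cons, List.countP_cons, ih]
    split_ifs with h1 h2 <;> simp_all <;> ring

theorem range_map_getD_eq_take_drop_map {α β : Type} (st : List α) (f : α → β) (d : α) (a k : Nat)
    (h : a + k ≤ st.length) :
    (List.range k).map (fun j => f (st.getD (a + j) d)) = ((st.drop a).take k).map f := by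
  apply List.ext_getElem
  · simp; omega
  · intro j hj1 hj2
    have hlt : a + j < st.length := by simp at hj1; omega
    simp [List.getElem?_eq_getElem hlt]

theorem window_getD {α : Type} (seq : List α) (d : α) (a k j : Nat) (hj : j < k)
    (hak : a + k ≤ seq.length) : ((seq.drop a).take k).getD j d = seq.getD (a + j) d := by
  have hja : a + j < seq.length := by omega
  have hw : j < ((seq.drop a).take k).length := by simp; omega
  rw [List.getD_eq_getElem _ d hw, List.getD_eq_getElem _ d hja, List.getElem_take, List.getElem_drop]

theorem pyGetD_shift {α : Type} (seq : List α) (d : α) (a j : Nat) :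
    PySem.List.pyGetD seq ((a : Int) + (j : Int)) d = seq.getD (a + j) d := by
  rw [show (a : Int) + (j : Int) = ((a + j : Nat) : Int) by push_cast; ring]
  simp only [PySem.List.pyGetD_natCast]

theorem set_getD_insert_preserves (key : String) (hkey : key ≠ "MWE") (tag : Option String)
    (s : List (List (String × Option String))) (j : Int) (hj : 0 ≤ j) :
    (PySem.List.pySetD s j (((PySem.Dict.mk (PySem.List.pyGetD s j [])).insert "MWE" tag).items)).map (fun d => pvKey d key)
      = s.map (fun d => pvKey d key) := by
  rw [PySem.List.pySetD_of_nonneg _ _ hj]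
  rcases lt_or_ge j.toNat s.length with hlt | hge
  · rw [List.map_set]
    have hget : PySem.List.pyGetD s j [] = s[j.toNat] :=
      PySem.List.pyGetD_eq_getElem s [] hj (by omega)
    have hval : pvKey (((PySem.Dict.mk (PySem.List.pyGetD s j [])).insert "MWE" tag).items) key
        = pvKey s[j.toNat] key := by
      unfold pvKey
      rw [hget]
      rw [show PySem.Dict.mk (((PySem.Dict.mk s[j.toNat]).insert "MWE" tag).items)
            = (PySem.Dict.mk s[j.toNat]).insert "MWE" tag from rfl]
      rw [PySem.Dict.get?_insert_of_ne _ _ hkey]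
    rw [hval]
    have hmap : (s.map (fun d => pvKey d key))[j.toNat]'(by simpa using hlt) = pvKey s[j.toNat] key :=
      List.getElem_map (fun d => pvKey d key)
    rw [← hmap, List.set_getElem_self]
  · rw [List.set_eq_of_length_le (by simpa using hge)]

-- the tag-application fold shared (up to the tag value) by both ports
def tagFold (tag : Option String) (i : Int) (l : List Int)
    (st : List (List (String × Option String))) : List (List (String × Option String)) :=
  l.foldl (fun s q => PySem.List.pySetD s (i + q)
    (((PySem.Dict.mk (PySem.List.pyGetD s (i + q) [])).insert "MWE" tag).items)) st

theorem tagLoopA_eq_tagFold (st : List (List (String × Option String))) (i gram : Int)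
    (MWE : List (Option String)) :
    tagLoopA st i gram MWE = tagFold (mweStringA MWE) i (PySem.List.pyRange 0 gram 1) st := rfl

theorem tagFold_preserves (key : String) (hkey : key ≠ "MWE") (tag : Option String) (i : Int)
    (hi : 0 ≤ i) : ∀ (l : List Int), (∀ q ∈ l, 0 ≤ q) →
    ∀ st, (tagFold tag i l st).map (fun d => pvKey d key) = st.map (fun d => pvKey d key)
        ∧ (tagFold tag i l st).length = st.length := by
  intro l
  induction l with
  | nil => intro _ st; exact ⟨rfl, rfl⟩
  | cons q t ih =>
    intro hq st
    have hiq : (0 : Int) ≤ i + q := by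
      have := hq q (List.mem_cons_self)
      omega
    have hstep := ih (fun x hx => hq x (List.mem_cons_of_mem q hx))
      (PySem.List.pySetD st (i + q) (((PySem.Dict.mk (PySem.List.pyGetD st (i + q) [])).insert "MWE" tag).items))
    unfold tagFold at hstep ⊢
    simp only [List.foldl_cons]
    refine ⟨?_, ?_⟩
    · rw [hstep.1, set_getD_insert_preserves key hkey tag st (i + q) hiq]
    · rw [hstep.2, PySem.List.pySetD_of_nonneg _ _ hiq, List.length_set]

def allNoneA (st : List (List (String × Option String))) (i gram : Int) : Bool :=
  ((PySem.List.pyRange 0 gram 1).map (fun n => pvKey (PySem.List.pyGetD st (i + n) []) "MWE")).all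
    (fun v => v == none)

theorem goldLoopA_of_not_allNone (i gram : Int) (MWE W : List (Option String))
    (st : List (List (String × Option String))) (Golds : List (List String))
    (h : allNoneA st i gram = false) :
    goldLoopA i gram MWE W st Golds = st := by
  induction Golds with
  | nil => rfl
  | cons g rest ih =>
    unfold goldLoopA
    unfold allNoneA at h
    simp only [h]
    split_ifs <;> simp_all

theorem goldLoopA_of_allNone (i gram : Int) (MWE W : List (Option String))
    (st : List (List (String × Option String))) (Golds : List (List String))
    (h : allNoneA st i gram = true) :
    goldLoopA i gram MWE W st Golds =
      if Golds.any (fun g => ((g.length : Int) == (MWE.length : Int))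
          && (countA g MWE == (g.length : Int) || countA g W == (g.length : Int)))
        then tagLoopA st i gram MWE else st := by
  induction Golds with
  | nil => rfl
  | cons g rest ih =>
    unfold goldLoopA
    unfold allNoneA at h
    simp only [h, List.any_cons]
    split_ifs <;> simp_all

theorem countA_eq_length_iff (g : List String) (seq : List (Option String)) :
    countA g seq = (g.length : Int) ↔
      ∀ j : Nat, j < g.length →
        (g.getD j "" = "wildcard" ∨ (some (g.getD j "") : Option String) = seq.getD j none) := by
  unfold countA
  rw [PySem.List.pyRange_one]
  simp only [Int.sub_zero, Int.toNat_natCast, List.foldl_map]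
  simp only [zero_add, PySem.List.pyGetD_natCast]
  rw [foldl_two_if_count (List.range g.length)
      (fun k => g.getD k "" == "wildcard")
      (fun k => (some (g.getD k "") : Option String) == seq.getD k none) 0]
  rw [zero_add]
  have hcast : ((List.countP (fun k => (g.getD k "" == "wildcard") ||
      ((some (g.getD k "") : Option String) == seq.getD k none)) (List.range g.length) : Nat) : Int)
      = (g.length : Int) ↔
      List.countP (fun k => (g.getD k "" == "wildcard") ||
      ((some (g.getD k "") : Option String) == seq.getD k none)) (List.range g.length) = g.length := by
    omega
  rw [hcast]
  have hgen : ∀ (n : Nat) (p : Nat → Bool), (List.countP p (List.range n) = n ↔ ∀ j < n, p j = true) := by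
    intro n p
    have h2 : List.countP p (List.range n) = (List.range n).length ↔ ∀ a ∈ List.range n, p a = true :=
      List.countP_eq_length
    simpa [List.length_range, List.mem_range] using h2
  rw [hgen]
  simp

theorem window_eq_iff (p : List String) (seq : List (Option String)) (a k : Nat)
    (hp : p.length = k) (hak : a + k ≤ seq.length) :
    (p.map some = (seq.drop a).take k) ↔
      ∀ j : Nat, j < k → (some (p.getD j "") : Option String) = seq.getD (a + j) none := by
  have hwl : ((seq.drop a).take k).length = k := by simp; omega
  constructor
  · intro h j hj
    have h1 : (p.map some)[j]? = ((seq.drop a).take k)[j]? := by rw [h]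
    have hjp : j < p.length := by omega
    have hja : a + j < seq.length := by omega
    rw [List.getElem?_map, List.getElem?_eq_getElem hjp] at h1
    rw [List.getElem?_take_of_lt hj, List.getElem?_drop, List.getElem?_eq_getElem hja] at h1
    simp at h1
    rw [List.getD_eq_getElem p "" hjp, List.getD_eq_getElem seq none hja, h1]
  · intro h
    apply List.ext_getElem
    · simp [hp]; omega
    · intro j hj1 hj2
      have hjk : j < k := by simpa [hp] using hj1
      have hjp : j < p.length := by omega
      have hja : a + j < seq.length := by omega
      have := h j hjk
      rw [List.getD_eq_getElem p "" hjp, List.getD_eq_getElem seq none hja] at this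
      simp only [List.getElem_map]
      rw [this]
      rw [List.getElem_take, List.getElem_drop]

theorem slice_window {α : Type} (seq : List α) (a k : Nat) :
    PySem.List.slice seq (some (a : Int)) (some ((a : Int) + (k : Int))) = (seq.drop a).take k :=
  PySem.List.slice_natCast_add seq a k

theorem bHit_eq (k a : Nat) (pats : List (List String))
    (hlen : ∀ p ∈ pats, p.length = k)
    (seq : List (Option String)) (hak : a + k ≤ seq.length) :
    bHit (k : Int)
      (PySem.Set.ofList ((pats.filter (fun p => !(p.contains "wildcard"))).map (fun p => p.map some)))
      (pats.filter (fun p => p.contains "wildcard")) seq (a : Int)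
    = pats.any (fun p => decide (∀ j : Nat, j < k →
        (p.getD j "" = "wildcard" ∨ (some (p.getD j "") : Option String) = seq.getD (a + j) none))) := by
  unfold bHit
  rw [slice_window]
  apply Bool.eq_iff_iff.mpr
  constructor
  · intro h
    rcases Bool.or_eq_true_iff.mp h with h | h
    · have hmem : (seq.drop a).take k ∈
          (pats.filter (fun p => !(p.contains "wildcard"))).map (fun p => p.map some) := by
        have := (List.contains_iff_mem).mp h
        simpa [PySem.Set.mem_ofList] using this
      rcases List.mem_map.mp hmem with ⟨p, hpmem, hpeq⟩
      rcases List.mem_filter.mp hpmem with ⟨hppats, hnwc⟩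
      simp only [List.any_eq_true]
      refine ⟨p, hppats, decide_eq_true ?_⟩
      intro j hj
      exact Or.inr ((window_eq_iff p seq a k (hlen p hppats) hak).mp hpeq j hj)
    · rcases List.any_eq_true.mp h with ⟨p, hpmem, hall⟩
      rcases List.mem_filter.mp hpmem with ⟨hppats, hwc⟩
      simp only [List.any_eq_true]
      refine ⟨p, hppats, decide_eq_true ?_⟩
      intro j hj
      have hj' := List.all_eq_true.mp hall (j : Int)
        (by rw [PySem.List.mem_pyRange_one]; omega)
      have e1 : PySem.List.pyGetD p (j : Int) "" = p.getD j "" := by simp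
      have e2 := pyGetD_shift seq none a j
      rw [e1, e2] at hj'
      rcases Bool.or_eq_true_iff.mp hj' with h1 | h1
      · exact Or.inl (by simpa using h1)
      · exact Or.inr (by simpa using h1)
  · intro h
    rcases List.any_eq_true.mp h with ⟨p, hppats, hdec⟩
    have hp := of_decide_eq_true hdec
    have hplen := hlen p hppats
    by_cases hwc : p.contains "wildcard"
    · apply Bool.or_eq_true_iff.mpr; right
      apply List.any_eq_true.mpr
      refine ⟨p, List.mem_filter.mpr ⟨hppats, hwc⟩, ?_⟩
      apply List.all_eq_true.mpr
      intro j hjmem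
      rw [PySem.List.mem_pyRange_one] at hjmem
      have hj0 : 0 ≤ j := hjmem.1
      set jn := j.toNat with hjn
      have hje : j = (jn : Int) := by omega
      have hjk : jn < k := by omega
      rcases hp jn hjk with h1 | h1
      · apply Bool.or_eq_true_iff.mpr; left
        rw [hje]; simpa using h1
      · apply Bool.or_eq_true_iff.mpr; right
        rw [hje]
        have e2 := pyGetD_shift seq none a jn
        rw [e2]; simpa using h1
    · apply Bool.or_eq_true_iff.mpr; left
      have hall : ∀ j : Nat, j < k → (some (p.getD j "") : Option String) = seq.getD (a + j) none := by
        intro j hj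
        rcases hp j hj with h1 | h1
        · exfalso
          have : "wildcard" ∈ p := by
            rw [← h1]
            rw [List.getD_eq_getElem p "" (by omega)]
            exact List.getElem_mem _
          simp at hwc
          exact hwc this
        · exact h1
      have hpeq := (window_eq_iff p seq a k hplen hak).mpr hall
      apply List.contains_iff_mem.mpr
      rw [PySem.Set.mem_ofList]
      exact List.mem_map.mpr ⟨p, List.mem_filter.mpr ⟨hppats, by simpa using hwc⟩, hpeq⟩

theorem join_cons_merge (a b : String) (ts : List String) :
    PySem.Str.join " " ((a ++ " " ++ b) :: ts) = PySem.Str.join " " (a :: b :: ts) := by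
  apply String.toList_inj.mp
  rw [PySem.Str.toList_join, PySem.Str.toList_join]
  cases ts with
  | nil =>
    simp [PySem.Chars.join_singleton, PySem.Chars.join_cons_cons]
  | cons c tt =>
    simp only [List.map_cons]
    rw [PySem.Chars.join_cons_cons, PySem.Chars.join_cons_cons, PySem.Chars.join_cons_cons]
    simp [List.append_assoc]

theorem foldl_concat_eq_join (t : List (Option String)) (x : Option String) :
    t.foldl (fun s y => pyConcat s (pyConcat (some " ") y)) x = pyJoinOpt (x :: t) := by
  induction t generalizing x with
  | nil =>
    cases x with
    | none => simp [pyJoinOpt]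
    | some a =>
      simp [pyJoinOpt]
      apply String.toList_inj.mp
      rw [PySem.Str.toList_join]
      simp [PySem.Chars.join_singleton]
  | cons y t ih =>
    simp only [List.foldl_cons]
    rw [ih]
    cases x with
    | none => simp [pyJoinOpt, pyConcat]
    | some a =>
      cases y with
      | none => simp [pyJoinOpt, pyConcat]
      | some b =>
        simp only [pyConcat]
        unfold pyJoinOpt
        by_cases hall : t.all (fun o => o.isSome)
        · simp only [hall, if_pos, List.all_cons, Option.isSome_some, Bool.true_and,
            List.map_cons, Option.getD_some]
          rw [← String.append_assoc]
          exact congrArg some (join_cons_merge a b _)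
        · simp [hall]

theorem mweStringA_cons (x : Option String) (t : List (Option String)) :
    mweStringA (x :: t) = t.foldl (fun s y => pyConcat s (pyConcat (some " ") y)) x := by
  unfold mweStringA
  have h1 : ((((x :: t).length : Nat) : Int) - 1) = (t.length : Int) := by
    simp only [List.length_cons]; push_cast; ring
  rw [h1, PySem.List.pyGetD_zero_cons]
  rw [PySem.List.foldl_congr_mem (PySem.List.pyRange 0 (t.length : Int) 1)
      (fun s j => pyConcat s (pyConcat (some " ") (PySem.List.pyGetD (x :: t) (j + 1) none)))
      (fun s j => pyConcat s (pyConcat (some " ") (PySem.List.pyGetD t j none))) x ?_]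
  · exact PySem.List.foldl_pyRange_zero_pyGetD' t none (fun s y => pyConcat s (pyConcat (some " ") y)) x
  · intro acc j hj
    rw [PySem.List.mem_pyRange_one] at hj
    have h2 : PySem.List.pyGetD (x :: t) (j + 1) none = PySem.List.pyGetD t j none := by
      rw [PySem.List.pyGetD_eq_getElem _ _ (by omega) (by simp only [List.length_cons]; push_cast; omega),
          PySem.List.pyGetD_eq_getElem _ _ (by omega) (by omega)]
      have : (j + 1).toNat = j.toNat + 1 := by omega
      simp [this]
    dsimp only
    rw [h2]

theorem mwe_eq_join (xs : List (Option String)) (h : xs ≠ []) :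
    mweStringA xs = pyJoinOpt xs := by
  cases xs with
  | nil => exact absurd rfl h
  | cons x t => rw [mweStringA_cons, foldl_concat_eq_join]

theorem splitOn_go_ne_nil (sep : List Char) : ∀ (fuel : Nat) (l cur : List Char) (acc : List (List Char)),
    PySem.Chars.splitOn.go sep fuel l cur acc ≠ [] := by
  intro fuel
  induction fuel with
  | zero => intro l cur acc; simp [PySem.Chars.splitOn.go]
  | succ fuel ih =>
    intro l cur acc
    cases l with
    | nil => simp [PySem.Chars.splitOn.go]
    | cons c rest =>
      rw [PySem.Chars.splitOn.go]
      split_ifs <;> apply ih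

theorem split_ne_nil (g : String) : (PySem.Str.split? g " ").getD [] ≠ [] := by
  unfold PySem.Str.split? PySem.Chars.split? PySem.Chars.splitOn
  rw [if_neg (by decide)]
  simp only [Option.map_some, Option.getD_some, ne_eq, List.map_eq_nil_iff]
  apply splitOn_go_ne_nil

-- ===== step functions (the two fold bodies, named for the proofs) =====

def stepA (Gold : List (List String)) (gram : Int)
    (st : List (List (String × Option String))) (i : Int) : List (List (String × Option String)) :=
  let MWE := (PySem.List.pyRange 0 gram 1).map
    (fun r => pvKey (PySem.List.pyGetD st (i + r) []) "lemma")
  let MWE_words := (PySem.List.pyRange 0 gram 1).map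
    (fun w => pvKey (PySem.List.pyGetD st (i + w) []) "word")
  goldLoopA i gram MWE MWE_words st Gold

def stepB (gram : Int) (exact : PySem.Set (List (Option String))) (wild : List (List String))
    (lemmas words : List (Option String))
    (st : List (List (String × Option String))) (i : Int) : List (List (String × Option String)) :=
  if (bHit gram exact wild lemmas i || bHit gram exact wild words i)
      && (PySem.List.slice st (some i) (some (i + gram))).all (fun d => pvKey d "MWE" == none) then
    let tag := pyJoinOpt (PySem.List.slice lemmas (some i) (some (i + gram)))
    (PySem.List.pyRange 0 gram 1).foldl
      (fun s q => PySem.List.pySetD s (i + q)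
        (((PySem.Dict.mk (PySem.List.pyGetD s (i + q) [])).insert "MWE" tag).items)) st
  else st

theorem get_eq_foldA (lst : List (List (String × Option String))) (gold : List String) (gram : Int) :
    get_allgram_MWE lst gold gram
      = List.foldl (stepA (gold.map (fun g => (PySem.Str.split? g " ").getD [])) gram) lst
          (PySem.List.pyRange 0 ((lst.length : Int) - (gram - 1)) 1) := rfl

theorem alt_eq_foldB (lst : List (List (String × Option String))) (gold : List String) (gram : Int) :
    get_allgram_MWE_alt lst gold gram
      = if gram < 1 || (lst.length : Int) < gram then lst
        else
          List.foldl
            (stepB gram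
              (PySem.Set.ofList
                ((((gold.map (fun g => (PySem.Str.split? g " ").getD [])).filter
                    (fun p => (p.length : Int) == gram)).filter
                      (fun p => !(p.contains "wildcard"))).map (fun p => p.map some)))
              (((gold.map (fun g => (PySem.Str.split? g " ").getD [])).filter
                  (fun p => (p.length : Int) == gram)).filter (fun p => p.contains "wildcard"))
              (lst.map (fun d => pvKey d "lemma")) (lst.map (fun d => pvKey d "word")))
            lst (PySem.List.pyRange 0 ((lst.length : Int) - gram + 1) 1) := rfl

-- window reads from the running state, as a map over the original window
theorem mapWindow (st : List (List (String × Option String))) (key : String) (a k : Nat)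
    (h : a + k ≤ st.length) :
    (PySem.List.pyRange 0 (k : Int) 1).map
        (fun r => pvKey (PySem.List.pyGetD st ((a : Int) + r) []) key)
      = ((st.drop a).take k).map (fun d => pvKey d key) := by
  rw [PySem.List.pyRange_one]
  simp only [Int.sub_zero, Int.toNat_natCast, List.map_map]
  rw [List.map_congr_left (g := fun j : Nat => pvKey (st.getD (a + j) []) key) ?_]
  · exact range_map_getD_eq_take_drop_map st (fun d => pvKey d key) [] a k h
  · intro j hj
    simp only [Function.comp_apply, zero_add]
    rw [pyGetD_shift st [] a j]

-- the per-window match condition characterisation used on both sides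
theorem countA_window_iff (seq0 : List (Option String)) (a k : Nat) (hak : a + k ≤ seq0.length)
    (g : List String) (hg : g.length = k) :
    (countA g ((seq0.drop a).take k) = (g.length : Int)) ↔
      ∀ j : Nat, j < k → (g.getD j "" = "wildcard" ∨
        (some (g.getD j "") : Option String) = seq0.getD (a + j) none) := by
  rw [countA_eq_length_iff]
  constructor
  · intro h j hj
    have := h j (by omega)
    rwa [window_getD seq0 none a k j hj hak] at this
  · intro h j hj
    have := h j (by omega)
    rwa [← window_getD seq0 none a k j (by omega) hak] at this

theorem step_eq (lst : List (List (String × Option String))) (gold : List String)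
    (k a : Nat) (hk : 1 ≤ k) (hak : a + k ≤ lst.length)
    (st : List (List (String × Option String)))
    (Hl : st.map (fun d => pvKey d "lemma") = lst.map (fun d => pvKey d "lemma"))
    (Hw : st.map (fun d => pvKey d "word") = lst.map (fun d => pvKey d "word"))
    (Hn : st.length = lst.length) :
    stepA (gold.map (fun g => (PySem.Str.split? g " ").getD [])) (k : Int) st (a : Int)
      = stepB (k : Int)
          (PySem.Set.ofList
            ((((gold.map (fun g => (PySem.Str.split? g " ").getD [])).filter
                (fun p => (p.length : Int) == (k : Int))).filter
                  (fun p => !(p.contains "wildcard"))).map (fun p => p.map some)))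
          (((gold.map (fun g => (PySem.Str.split? g " ").getD [])).filter
              (fun p => (p.length : Int) == (k : Int))).filter (fun p => p.contains "wildcard"))
          (lst.map (fun d => pvKey d "lemma")) (lst.map (fun d => pvKey d "word")) st (a : Int)
    ∧ (stepA (gold.map (fun g => (PySem.Str.split? g " ").getD [])) (k : Int) st (a : Int)).map
        (fun d => pvKey d "lemma") = lst.map (fun d => pvKey d "lemma")
    ∧ (stepA (gold.map (fun g => (PySem.Str.split? g " ").getD [])) (k : Int) st (a : Int)).map
        (fun d => pvKey d "word") = lst.map (fun d => pvKey d "word")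
    ∧ (stepA (gold.map (fun g => (PySem.Str.split? g " ").getD [])) (k : Int) st (a : Int)).length
        = lst.length := by
  set Gold := gold.map (fun g => (PySem.Str.split? g " ").getD []) with hGold
  set pats := Gold.filter (fun p => (p.length : Int) == (k : Int)) with hpats
  set L0 := lst.map (fun d => pvKey d "lemma") with hL0
  set W0 := lst.map (fun d => pvKey d "word") with hW0
  have hL0len : L0.length = lst.length := by simp [hL0]
  have hW0len : W0.length = lst.length := by simp [hW0]
  have hakst : a + k ≤ st.length := by omega
  -- the two token windows A builds from the state are windows of the fixed columns
  have hMWE : (PySem.List.pyRange 0 (k : Int) 1).map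
      (fun r => pvKey (PySem.List.pyGetD st ((a : Int) + r) []) "lemma") = (L0.drop a).take k := by
    rw [mapWindow st "lemma" a k hakst, List.map_take, List.map_drop, Hl]
  have hW : (PySem.List.pyRange 0 (k : Int) 1).map
      (fun r => pvKey (PySem.List.pyGetD st ((a : Int) + r) []) "word") = (W0.drop a).take k := by
    rw [mapWindow st "word" a k hakst, List.map_take, List.map_drop, Hw]
  have hMWElen : ((L0.drop a).take k).length = k := by simp; omega
  -- state's MWE window read by A = the slice-all B tests
  have hAllNone : allNoneA st (a : Int) (k : Int)
      = (PySem.List.slice st (some (a : Int)) (some ((a : Int) + (k : Int)))).all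
          (fun d => pvKey d "MWE" == none) := by
    unfold allNoneA
    rw [mapWindow st "MWE" a k hakst, slice_window, List.all_map]
    rfl
  have hlenpats : ∀ p ∈ pats, p.length = k := by
    intro p hp
    have := (List.mem_filter.mp hp).2
    have h2 : (p.length : Int) = (k : Int) := by simpa using this
    omega
  -- unfold A's step
  unfold stepA
  rw [hMWE, hW]
  by_cases hA : allNoneA st (a : Int) (k : Int) = true
  · rw [goldLoopA_of_allNone _ _ _ _ _ _ hA]
    -- the match predicates agree
    have hmatch : Gold.any (fun g => ((g.length : Int) == (((L0.drop a).take k).length : Int))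
          && (countA g ((L0.drop a).take k) == (g.length : Int)
              || countA g ((W0.drop a).take k) == (g.length : Int)))
        = (bHit (k : Int)
            (PySem.Set.ofList ((pats.filter (fun p => !(p.contains "wildcard"))).map (fun p => p.map some)))
            (pats.filter (fun p => p.contains "wildcard")) L0 (a : Int)
          || bHit (k : Int)
            (PySem.Set.ofList ((pats.filter (fun p => !(p.contains "wildcard"))).map (fun p => p.map some)))
            (pats.filter (fun p => p.contains "wildcard")) W0 (a : Int)) := by
      rw [bHit_eq k a pats hlenpats L0 (by omega), bHit_eq k a pats hlenpats W0 (by omega)]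
      rw [hMWElen]
      rw [hpats, List.any_filter, List.any_filter]
      apply Bool.eq_iff_iff.mpr
      simp only [List.any_eq_true, Bool.and_eq_true, Bool.or_eq_true, beq_iff_eq,
        decide_eq_true_eq, Nat.cast_inj]
      constructor
      · rintro ⟨g, hg, hglen, hcnt⟩
        have hglen' : g.length = k := by exact_mod_cast hglen
        rcases hcnt with hcnt | hcnt
        · exact Or.inl ⟨g, hg, by exact_mod_cast hglen', (countA_window_iff L0 a k (by omega) g hglen').mp hcnt⟩
        · exact Or.inr ⟨g, hg, by exact_mod_cast hglen', (countA_window_iff W0 a k (by omega) g hglen').mp hcnt⟩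
      · rintro (⟨g, hg, hglen, hm⟩ | ⟨g, hg, hglen, hm⟩)
        · have hglen' : g.length = k := by exact_mod_cast hglen
          exact ⟨g, hg, by exact_mod_cast hglen',
            Or.inl ((countA_window_iff L0 a k (by omega) g hglen').mpr hm)⟩
        · have hglen' : g.length = k := by exact_mod_cast hglen
          exact ⟨g, hg, by exact_mod_cast hglen',
            Or.inr ((countA_window_iff W0 a k (by omega) g hglen').mpr hm)⟩
    -- tags agree
    have htag : mweStringA ((L0.drop a).take k)
        = pyJoinOpt (PySem.List.slice L0 (some (a : Int)) (some ((a : Int) + (k : Int)))) := by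
      rw [slice_window]
      exact mwe_eq_join _ (by intro hnil; rw [hnil] at hMWElen; simp at hMWElen; omega)
    constructor
    · -- values equal
      unfold stepB
      rw [← hmatch, hAllNone.symm, hA, Bool.and_true]
      by_cases hm : Gold.any (fun g => ((g.length : Int) == (((L0.drop a).take k).length : Int))
          && (countA g ((L0.drop a).take k) == (g.length : Int)
              || countA g ((W0.drop a).take k) == (g.length : Int))) = true
      · rw [if_pos hm, if_pos hm, tagLoopA_eq_tagFold, htag]
        rfl
      · rw [if_neg hm, if_neg hm]
    · -- invariants
      split_ifs with hm
      · rw [tagLoopA_eq_tagFold]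
        have hq : ∀ q ∈ PySem.List.pyRange 0 (k : Int) 1, (0 : Int) ≤ q := by
          intro q hq
          rw [PySem.List.mem_pyRange_one] at hq
          omega
        have h1 := tagFold_preserves "lemma" (by decide) (mweStringA ((L0.drop a).take k)) (a : Int)
          (by omega) (PySem.List.pyRange 0 (k : Int) 1) hq st
        have h2 := tagFold_preserves "word" (by decide) (mweStringA ((L0.drop a).take k)) (a : Int)
          (by omega) (PySem.List.pyRange 0 (k : Int) 1) hq st
        refine ⟨by rw [h1.1, Hl], by rw [h2.1, Hw], by rw [h1.2, Hn]⟩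
      · exact ⟨Hl, Hw, Hn⟩
  · have hA' : allNoneA st (a : Int) (k : Int) = false := by
      cases h : allNoneA st (a : Int) (k : Int)
      · rfl
      · exact absurd h hA
    rw [goldLoopA_of_not_allNone _ _ _ _ _ _ hA']
    refine ⟨?_, Hl, Hw, Hn⟩
    unfold stepB
    rw [hAllNone] at hA'
    rw [hA', Bool.and_false, if_neg (by simp)]

theorem fold_eq (lst : List (List (String × Option String))) (gold : List String)
    (k : Nat) (hk : 1 ≤ k) :
    ∀ (idxs : List Int), (∀ i ∈ idxs, 0 ≤ i ∧ i + (k : Int) ≤ (lst.length : Int)) →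
    ∀ st, st.map (fun d => pvKey d "lemma") = lst.map (fun d => pvKey d "lemma") →
      st.map (fun d => pvKey d "word") = lst.map (fun d => pvKey d "word") →
      st.length = lst.length →
    List.foldl (stepA (gold.map (fun g => (PySem.Str.split? g " ").getD [])) (k : Int)) st idxs
      = List.foldl (stepB (k : Int)
          (PySem.Set.ofList
            ((((gold.map (fun g => (PySem.Str.split? g " ").getD [])).filter
                (fun p => (p.length : Int) == (k : Int))).filter
                  (fun p => !(p.contains "wildcard"))).map (fun p => p.map some)))
          (((gold.map (fun g => (PySem.Str.split? g " ").getD [])).filter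
              (fun p => (p.length : Int) == (k : Int))).filter (fun p => p.contains "wildcard"))
          (lst.map (fun d => pvKey d "lemma")) (lst.map (fun d => pvKey d "word"))) st idxs := by
  intro idxs
  induction idxs with
  | nil => intro _ st _ _ _; rfl
  | cons i t ih =>
    intro hb st Hl Hw Hn
    have hbi := hb i List.mem_cons_self
    have hie : i = ((i.toNat : Nat) : Int) := by omega
    have hak : i.toNat + k ≤ lst.length := by omega
    have hstep := step_eq lst gold k i.toNat hk hak st Hl Hw Hn
    simp only [List.foldl_cons]
    rw [hie]
    have hrest := ih (fun j hj => hb j (List.mem_cons_of_mem _ hj)) _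
      hstep.2.1 hstep.2.2.1 hstep.2.2.2
    rw [hrest, hstep.1]

theorem goldLoopA_nil_MWE (i gram : Int) (W : List (Option String))
    (st : List (List (String × Option String))) :
    ∀ (Golds : List (List String)), (∀ g ∈ Golds, g ≠ []) →
      goldLoopA i gram [] W st Golds = st := by
  intro Golds h
  induction Golds with
  | nil => rfl
  | cons g rest ih =>
    unfold goldLoopA
    have hg := h g List.mem_cons_self
    have hlen : g.length ≠ 0 := by simpa [List.length_eq_zero_iff] using hg
    rw [if_neg (by simp [hlen])]
    exact ih (fun g' hg' => h g' (List.mem_cons_of_mem _ hg'))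

theorem get_allgram_MWE_eq_alt (list_of_dicts : List (List (String × Option String))) (gold : List String) (gram : Int) :
    get_allgram_MWE list_of_dicts gold gram = get_allgram_MWE_alt list_of_dicts gold gram := by
  rw [get_eq_foldA, alt_eq_foldB]
  by_cases hcase : gram < 1 ∨ (list_of_dicts.length : Int) < gram
  · rw [if_pos (by rcases hcase with h | h <;> simp [h])]
    by_cases hbig : (list_of_dicts.length : Int) < gram
    · rw [PySem.List.pyRange_one_eq_nil (by omega)]
      rfl
    · have hsm : gram < 1 := by tauto
      have hstep : ∀ st (i : Int),
          stepA (gold.map (fun g => (PySem.Str.split? g " ").getD [])) gram st i = st := by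
        intro st i
        unfold stepA
        rw [PySem.List.pyRange_one_eq_nil (by omega)]
        simp only [List.map_nil]
        apply goldLoopA_nil_MWE
        intro g hg
        rcases List.mem_map.mp hg with ⟨g0, _, hg0⟩
        rw [← hg0]
        exact split_ne_nil g0
      have hconst : ∀ (l : List Int) st,
          List.foldl (stepA (gold.map (fun g => (PySem.Str.split? g " ").getD [])) gram) st l = st := by
        intro l
        induction l with
        | nil => intro st; rfl
        | cons x t ih => intro st; simp only [List.foldl_cons, hstep]; exact ih st
      exact hconst _ _
  · rw [not_or] at hcase
    have hcase : 1 ≤ gram ∧ gram ≤ (list_of_dicts.length : Int) := by omega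
    obtain ⟨h1, h2⟩ := hcase
    rw [if_neg (by simp; omega)]
    set k := gram.toNat with hkdef
    have hgram : gram = (k : Int) := by omega
    rw [hgram, show ((list_of_dicts.length : Int) - ((k : Int) - 1)) = ((list_of_dicts.length : Int) - (k : Int) + 1) by ring]
    exact fold_eq list_of_dicts gold k (by omega)
      (PySem.List.pyRange 0 ((list_of_dicts.length : Int) - (k : Int) + 1) 1)
      (by
        intro i hi
        rw [PySem.List.mem_pyRange_one] at hi
        omega)
      list_of_dicts rfl rfl rfl

-- ===== VERDICT (by name: the statement is the Claim_ definition above) =====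
theorem get_allgram_MWE_spec : Claim_equal_get_allgram_MWE := by
  intro lst gold gram _ _
  unfold Spec_get_allgram_MWE
  exact get_allgram_MWE_eq_alt lst gold gram
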